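-- pv_equiv track=rewrite | github.com/DrBugKiller/offer | 剑指offer/第二章面试需要的基础知识/13-机器人的运动范围.py | get_sum_of_digital
-- ===== SOURCE A (Python) =====
-- def get_sum_of_digital(i,j):
--     #求i和j的各自的数位字和. 例如,i=363,j=12, 那个返回3+6+3+1+2=15
--     num=i
--     sum=0
--     while num//10!=0:
--         sum+=num%10
--         num=num//10
--     sum+=num
--     num=j
--     while num//10!=0:
--         sum+=num%10
--         num=num//10
--     sum+=num
--     return sum
-- ===== SOURCE B (Python) =====
-- def get_sum_of_digital(i, j):
--     # digit sum of i plus digit sum of j, read off the decimal string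
--     return sum(int(d) for d in str(i)) + sum(int(d) for d in str(j))
-- ===== Notes on version B (the rewrite author's own statement) =====
-- stated objective: idiomatic
-- what changed: B sums the digits by iterating over each number's decimal string representation instead of peeling digits arithmetically with %10 and //10 in while loops.
import Mathlib
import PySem

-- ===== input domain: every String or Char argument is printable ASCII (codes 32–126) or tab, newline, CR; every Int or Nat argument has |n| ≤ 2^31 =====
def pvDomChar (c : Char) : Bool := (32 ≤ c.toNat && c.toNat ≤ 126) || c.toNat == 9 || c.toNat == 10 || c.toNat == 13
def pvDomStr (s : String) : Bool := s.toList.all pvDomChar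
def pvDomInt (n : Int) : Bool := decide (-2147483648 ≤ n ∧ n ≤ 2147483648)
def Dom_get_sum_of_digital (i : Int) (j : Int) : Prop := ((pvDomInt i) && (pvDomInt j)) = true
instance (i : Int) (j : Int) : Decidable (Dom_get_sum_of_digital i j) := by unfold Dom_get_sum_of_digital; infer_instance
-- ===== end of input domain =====

-- B reads the digit sum off each number's decimal string instead of peeling digits with %10 and //10 (idiomatic; same cost).

-- ===== PORT A =====
-- the while loop 'while num//10 != 0: sum += num%10; num //= 10', then 'sum += num';
-- fuel only makes the recursion total in Lean (32 > the decimal length of any |n| ≤ 2^31;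
-- on negative num Python's loop never terminates — those inputs are outside Pre_).
def pvLoopA : Nat → Int → Int → Int
  | 0, num, s => s + num
  | fuel + 1, num, s =>
      if PySem.Int.floordiv num 10 ≠ 0 then
        pvLoopA fuel (PySem.Int.floordiv num 10) (s + PySem.Int.mod num 10)
      else s + num

def get_sum_of_digital (i : Int) (j : Int) : Int :=
  pvLoopA 32 j (pvLoopA 32 i 0)

-- ===== PORT B =====
-- int(d) for one character d: PySem.Int.ofStr? (exact; never none on the digit characters of str(n) for n ≥ 0)
def pvDigitSumStr (n : Int) : Int :=
  (((PySem.Int.toStr n).toList).map (fun c => (PySem.Int.ofStr? (String.singleton c)).getD 0)).sum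

def get_sum_of_digital_alt (i : Int) (j : Int) : Int :=
  pvDigitSumStr i + pvDigitSumStr j

-- ===== PRECONDITION & SPEC =====
-- A's while loops never terminate for a negative argument (num//10 floors towards -∞ and stays at -1),
-- and B raises ValueError on the '-' character there; both arguments must be non-negative.
def Pre_get_sum_of_digital (i : Int) (j : Int) : Prop := 0 ≤ i ∧ 0 ≤ j
instance (i : Int) (j : Int) : Decidable (Pre_get_sum_of_digital i j) := by unfold Pre_get_sum_of_digital; infer_instance
def pvWitness_get_sum_of_digital : Int × Int := (363, 12)

def Spec_get_sum_of_digital (i : Int) (j : Int) (out : Int) : Prop := out = get_sum_of_digital_alt i j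
instance (i : Int) (j : Int) (out : Int) : Decidable (Spec_get_sum_of_digital i j out) := by unfold Spec_get_sum_of_digital; infer_instance

-- ===== CLAIM (what is proved, stated in full; the proofs are below) =====
def Claim_equal_get_sum_of_digital : Prop := ∀ (i : Int) (j : Int), Dom_get_sum_of_digital i j → Pre_get_sum_of_digital i j → Spec_get_sum_of_digital i j (get_sum_of_digital i j)

-- ===== LEMMAS AND PROOFS =====

-- A's loop adds the decimal digit sum of its (non-negative) argument to the accumulator.
lemma pvLoopA_eq (f : Nat) : ∀ (m : Nat) (s : Int), m < 10 ^ f →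
    pvLoopA f (m : Int) s = s + ((Nat.digits 10 m).sum : Int) := by
  induction f with
  | zero =>
      intro m s h
      interval_cases m
      simp [pvLoopA]
  | succ f ih =>
      intro m s h
      by_cases h10 : m < 10
      · have hz : PySem.Int.floordiv (m : Int) 10 = 0 := by
          rw [show ((10 : Int)) = ((10 : Nat) : Int) by norm_num, PySem.Int.floordiv_natCast]
          omega
        have hd : (Nat.digits 10 m).sum = m := by
          interval_cases m <;> simp
        rw [pvLoopA, if_neg (by simp; omega), hd]
      · have hz : PySem.Int.floordiv (m : Int) 10 ≠ 0 := by
          rw [show ((10 : Int)) = ((10 : Nat) : Int) by norm_num, PySem.Int.floordiv_natCast]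
          omega
        have hdv : PySem.Int.floordiv (m : Int) 10 = ((m / 10 : Nat) : Int) := by
          rw [show ((10 : Int)) = ((10 : Nat) : Int) by norm_num, PySem.Int.floordiv_natCast]
        have hmd : PySem.Int.mod (m : Int) 10 = ((m % 10 : Nat) : Int) := by
          rw [show ((10 : Int)) = ((10 : Nat) : Int) by norm_num, PySem.Int.mod_natCast]
        have hlt : m / 10 < 10 ^ f := by
          have := Nat.pow_succ 10 f
          omega
        have hdig : Nat.digits 10 m = m % 10 :: Nat.digits 10 (m / 10) :=
          Nat.digits_def' (by norm_num) (by omega)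
        rw [pvLoopA, if_pos hz, hdv, hmd, ih (m / 10) _ hlt, hdig, List.sum_cons]
        push_cast
        ring

-- Nat.toDigitsCore (behind str(n)) lists the decimal digits, most significant first.
lemma pvToDigitsCore_eq : ∀ (f m : Nat) (l : List Char), 0 < m → m < f →
    Nat.toDigitsCore 10 f m l = ((Nat.digits 10 m).map Nat.digitChar).reverse ++ l := by
  intro f
  induction f with
  | zero => intro m l h1 h2; omega
  | succ f ih =>
      intro m l h1 h2
      rw [Nat.toDigitsCore]
      by_cases hz : m / 10 = 0
      · have hm10 : m < 10 := by omega
        have hd : Nat.digits 10 m = [m % 10] := by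
          rw [Nat.digits_def' (by norm_num) h1]
          simp [hz]
        simp [hz, hd]
      · have hlt : m / 10 < f := by omega
        rw [if_neg hz, ih (m / 10) _ (by omega) hlt,
            Nat.digits_def' (by norm_num) h1]
        simp

-- int(c) on a single decimal digit character
lemma pvOfStr_digitChar (d : Nat) (h : d < 10) :
    (PySem.Int.ofStr? (String.singleton (Nat.digitChar d))).getD 0 = (d : Int) := by
  interval_cases d <;> decide

-- B's helper computes the decimal digit sum for a non-negative argument.
lemma pvDigitSumStr_eq (m : Nat) : pvDigitSumStr (m : Int) = ((Nat.digits 10 m).sum : Int) := by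
  unfold pvDigitSumStr
  rw [PySem.Int.toList_toStr]
  by_cases h0 : m = 0
  · subst h0; decide
  · have hpos : 0 < m := Nat.pos_of_ne_zero h0
    have hneg : ¬ ((m : Int) < 0) := by omega
    have htc : PySem.Int.toChars (m : Int) = Nat.toDigits 10 m := by
      simp [PySem.Int.toChars, hneg]
    rw [htc, Nat.toDigits, pvToDigitsCore_eq (m + 1) m [] hpos (by omega)]
    rw [List.append_nil, List.map_reverse, List.sum_reverse, List.map_map]
    have hmap : (Nat.digits 10 m).map
        ((fun c => (PySem.Int.ofStr? (String.singleton c)).getD 0) ∘ Nat.digitChar)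
        = (Nat.digits 10 m).map (Nat.cast : Nat → Int) := by
      apply List.map_congr_left
      intro d hd
      exact pvOfStr_digitChar d (Nat.digits_lt_base (by norm_num) hd)
    rw [hmap]
    exact (Nat.cast_list_sum (Nat.digits 10 m)).symm

-- ===== VERDICT (by name: the statement is the Claim_ definition above) =====
theorem get_sum_of_digital_spec : Claim_equal_get_sum_of_digital := by
  intro i j hdom hpre
  obtain ⟨hi, hj⟩ := hpre
  have hdi : i ≤ 2147483648 ∧ j ≤ 2147483648 := by
    unfold Dom_get_sum_of_digital pvDomInt at hdom
    simp at hdom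
    omega
  obtain ⟨hib, hjb⟩ := hdi
  obtain ⟨mi, rfl⟩ : ∃ m : Nat, i = (m : Int) := ⟨i.toNat, (Int.toNat_of_nonneg hi).symm⟩
  obtain ⟨mj, rfl⟩ : ∃ m : Nat, j = (m : Int) := ⟨j.toNat, (Int.toNat_of_nonneg hj).symm⟩
  have hmi : mi < 10 ^ 32 := by
    have : (mi : Int) ≤ 2147483648 := hib
    have h1 : mi ≤ 2147483648 := by exact_mod_cast this
    calc mi ≤ 2147483648 := h1
      _ < 10 ^ 32 := by norm_num
  have hmj : mj < 10 ^ 32 := by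
    have : (mj : Int) ≤ 2147483648 := hjb
    have h1 : mj ≤ 2147483648 := by exact_mod_cast this
    calc mj ≤ 2147483648 := h1
      _ < 10 ^ 32 := by norm_num
  show get_sum_of_digital _ _ = _
  unfold get_sum_of_digital get_sum_of_digital_alt
  rw [pvLoopA_eq 32 mi 0 hmi, pvLoopA_eq 32 mj _ hmj,
      pvDigitSumStr_eq, pvDigitSumStr_eq]
  ring
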